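-- pv_equiv track=rewrite | github.com/glue25/MdNotes | Word&Trans/Words/Pysrc/utilities.py | __ProcessRawLine
-- ===== SOURCE A (Python) =====
-- __ElementsNums = 3
--
-- def __ProcessRawLine(line, SplitSigns) :
--     #暂时假设不处理单词与翻译中有空格的情况。
--     line = line.replace('\n', '')
--     SplitSigns = list(SplitSigns)
--     for i in SplitSigns[1:] :
--         line = line.replace(i, SplitSigns[0])
--     elements = [x for x in line.split(SplitSigns[0]) if len(x) > 0]
--     if len(elements) < __ElementsNums :
--         elements.append('')
--     return elements
-- ===== SOURCE B (Python) =====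
-- def _table(p):
--     # Boyer-Moore-Horspool bad-character shift table for pattern p (non-empty)
--     t = {}
--     m = len(p)
--     for j in range(m - 1):
--         t[p[j]] = m - 1 - j
--     return t
--
-- def _find(s, p, t, i):
--     # Horspool search: leftmost occurrence of non-empty p in s at index >= i, else -1;
--     # on a mismatch the alignment jumps by the precomputed shift of the window's last char
--     m = len(p)
--     n = len(s)
--     while i + m <= n:
--         if s[i:i+m] == p:
--             return i
--         i += t.get(s[i + m - 1], m)
--     return -1
--
-- def _pieces(s, p):
--     # chunks of s between greedy leftmost non-overlapping occurrences of p,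
--     # located by Horspool jumps; an empty p cuts at every character boundary
--     if p == '':
--         return [''] + list(s) + ['']
--     t = _table(p)
--     out = []
--     i = 0
--     j = _find(s, p, t, i)
--     while j >= 0:
--         out.append(s[i:j])
--         i = j + len(p)
--         j = _find(s, p, t, i)
--     out.append(s[i:])
--     return out
--
-- def __ProcessRawLine(line, SplitSigns):
--     first = SplitSigns[0]
--     text = ''.join(_pieces(line, '\n'))
--     for sg in SplitSigns[1:]:
--         text = first.join(_pieces(text, sg))
--     elements = [x for x in _pieces(text, first) if x]
--     if len(elements) < 3:
--         elements.append('')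
--     return elements
-- ===== Notes on version B (the rewrite author's own statement) =====
-- stated objective: alternative
-- what changed: B replaces the builtin replace/split passes with a Boyer-Moore-Horspool matcher: each sign gets a precomputed bad-character shift table and the text is cut at occurrences found by right-end jump search, so every stage works by skipping alignments instead of per-character scanning.
-- outside the precondition, e.g. on __ProcessRawLine('a,b', []): A raises IndexError, B raises IndexError; on __ProcessRawLine('a,b', ['']): A raises ValueError, B returns ['a', ',', 'b']
import Mathlib
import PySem

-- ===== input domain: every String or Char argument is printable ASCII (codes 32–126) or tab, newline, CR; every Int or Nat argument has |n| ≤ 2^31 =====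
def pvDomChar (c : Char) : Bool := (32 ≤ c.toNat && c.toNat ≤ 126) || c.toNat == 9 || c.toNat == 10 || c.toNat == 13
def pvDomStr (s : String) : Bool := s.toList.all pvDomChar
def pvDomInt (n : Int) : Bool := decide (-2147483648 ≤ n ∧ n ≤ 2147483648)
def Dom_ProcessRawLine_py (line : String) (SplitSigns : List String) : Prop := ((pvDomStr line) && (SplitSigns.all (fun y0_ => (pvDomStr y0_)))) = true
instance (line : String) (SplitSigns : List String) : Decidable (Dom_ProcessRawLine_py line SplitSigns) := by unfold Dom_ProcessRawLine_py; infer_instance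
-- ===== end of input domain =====

-- B locates every separator occurrence with a Boyer–Moore–Horspool matcher (precomputed
-- bad-character shift table, jump-based search) and cuts the text at the found positions,
-- instead of A's builtin per-character replace passes followed by split-and-filter.

-- ===== PORT A =====
def ProcessRawLine_py (line : String) (SplitSigns : List String) : List String :=
  match PySem.List.pyGet? SplitSigns 0 with
  | none => []   -- IndexError on SplitSigns[0]: outside Pre_
  | some first =>
    let line1 := PySem.Str.replace line "\n" ""
    let line2 := (PySem.List.slice SplitSigns (some 1) none).foldl
                   (fun l i => PySem.Str.replace l i first) line1
    match PySem.Str.split? line2 first with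
    | none => []   -- ValueError: empty separator, outside Pre_
    | some parts =>
      let elements := parts.filter (fun x => decide (0 < PySem.Str.len x))
      if elements.length < 3 then elements ++ [""] else elements

-- ===== PORT B =====
-- Source B's _table: Horspool bad-character shifts; values are the Nats m-1-j (Python ints,
-- all in [1, m-1], so Nat is exact); p[j] is in range for j < m-1, ported as getD with a
-- dummy default
def pvTable (p : List Char) : PySem.Dict Char Nat :=
  (List.range (p.length - 1)).foldl
    (fun t j => t.insert (p.getD j 'a') (p.length - 1 - j)) PySem.Dict.empty

-- Source B's _find while loop: i is the alignment cursor (a nonnegative Python int → Nat);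
-- s[i:i+m] == p is ported as (s.drop i).take m = p and s[i+m-1] as getD (in range whenever
-- the loop guard i+m ≤ n holds and p ≠ []); fuel n+1 suffices since every shift is ≥ 1
def pvFind (s p : List Char) (t : PySem.Dict Char Nat) : Nat → Nat → Option Nat
  | 0, _ => none
  | f + 1, i =>
    if i + p.length ≤ s.length then
      if (s.drop i).take p.length = p then some i
      else pvFind s p t f (i + t.getD (s.getD (i + p.length - 1) 'a') p.length)
    else none

-- Source B's _pieces while loop: repeated Horspool find, slicing s[i:j] between matches;
-- fuel n+1 suffices since i strictly increases
def pvPiecesGo (s p : List Char) (t : PySem.Dict Char Nat) : Nat → Nat → List (List Char) → List (List Char)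
  | 0, i, out => out ++ [s.drop i]
  | f + 1, i, out =>
    match pvFind s p t (s.length + 1) i with
    | none => out ++ [s.drop i]
    | some j => pvPiecesGo s p t f (j + p.length) (out ++ [(s.drop i).take (j - i)])

-- Source B's _pieces: an empty pattern cuts at every boundary
def pvPieces (s p : List Char) : List (List Char) :=
  if p.isEmpty then [[]] ++ s.map (fun c => [c]) ++ [[]]
  else pvPiecesGo s p (pvTable p) (s.length + 1) 0 []

def ProcessRawLine_py_alt (line : String) (SplitSigns : List String) : List String :=
  match PySem.List.pyGet? SplitSigns 0 with
  | none => []   -- IndexError on SplitSigns[0], as in Source B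
  | some first =>
    let text0 := PySem.Chars.join [] (pvPieces line.toList ['\n'])
    let text := (SplitSigns.drop 1).foldl
        (fun t sg => PySem.Chars.join first.toList (pvPieces t sg.toList)) text0
    let elements := ((pvPieces text first.toList).filter (· ≠ [])).map String.ofList
    if elements.length < 3 then elements ++ [""] else elements

-- ===== PRECONDITION & SPEC =====
-- Pre_ excludes exactly the inputs where A raises: an empty SplitSigns (IndexError on
-- SplitSigns[0]) and an empty FIRST sign (ValueError from line.split('')).
def Pre_ProcessRawLine_py (line : String) (SplitSigns : List String) : Prop :=
  SplitSigns ≠ [] ∧ SplitSigns.head? ≠ some ""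
instance (line : String) (SplitSigns : List String) : Decidable (Pre_ProcessRawLine_py line SplitSigns) := by unfold Pre_ProcessRawLine_py; infer_instance
def pvWitness_ProcessRawLine_py : String × List String := ("ab,cd;ef", [",", ";"])

def Spec_ProcessRawLine_py (line : String) (SplitSigns : List String) (out : List String) : Prop := out = ProcessRawLine_py_alt line SplitSigns
instance (line : String) (SplitSigns : List String) (out : List String) : Decidable (Spec_ProcessRawLine_py line SplitSigns out) := by unfold Spec_ProcessRawLine_py; infer_instance

-- ===== CLAIM (what is proved, stated in full; the proofs are below) =====
def Claim_equal_ProcessRawLine_py : Prop := ∀ (line : String) (SplitSigns : List String), Dom_ProcessRawLine_py line SplitSigns → Pre_ProcessRawLine_py line SplitSigns → Spec_ProcessRawLine_py line SplitSigns (ProcessRawLine_py line SplitSigns)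

-- ===== LEMMAS AND PROOFS =====

-- proof-side suffix machine: per-character prefix scan over the remaining suffix;
-- the bridge between B's Horspool cuts and A's PySem replace/splitOn
def pvSufGo (sep : List Char) : Nat → List Char → List Char → List (List Char) → List (List Char)
  | _, [], cur, parts => parts ++ [cur]
  | 0, _ :: _, cur, parts => parts ++ [cur]
  | fuel + 1, c :: rtl, cur, parts =>
      if sep.isPrefixOf (c :: rtl) then
        pvSufGo sep fuel ((c :: rtl).drop sep.length) [] (parts ++ [cur])
      else
        pvSufGo sep fuel rtl (cur ++ [c]) parts

-- accumulator normalisation for the scanner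
theorem pv_cutGo_acc (sep : List Char) :
    ∀ (fuel : Nat) (l cur : List Char) (parts : List (List Char)),
      pvSufGo sep fuel l cur parts
        = parts ++ List.modifyHead (cur ++ ·) (pvSufGo sep fuel l [] []) := by
  intro fuel
  induction fuel with
  | zero => intro l cur parts; cases l <;> simp [pvSufGo]
  | succ n ih =>
    intro l cur parts
    cases l with
    | nil => simp [pvSufGo]
    | cons c t =>
      by_cases hp : sep.isPrefixOf (c :: t) = true
      · rw [show pvSufGo sep (n+1) (c :: t) cur parts
              = pvSufGo sep n ((c :: t).drop sep.length) [] (parts ++ [cur]) from by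
            simp [pvSufGo, hp]]
        rw [show pvSufGo sep (n+1) (c :: t) [] []
              = pvSufGo sep n ((c :: t).drop sep.length) [] [[]] from by
            simp [pvSufGo, hp]]
        rw [ih _ [] (parts ++ [cur]), ih _ [] [[]]]
        cases h : pvSufGo sep n ((c :: t).drop sep.length) [] [] with
        | nil => simp
        | cons x xs => simp
      · rw [show pvSufGo sep (n+1) (c :: t) cur parts
              = pvSufGo sep n t (cur ++ [c]) parts from by simp [pvSufGo, hp]]
        rw [show pvSufGo sep (n+1) (c :: t) [] []
              = pvSufGo sep n t ([] ++ [c]) [] from by simp [pvSufGo, hp]]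
        rw [ih t (cur ++ [c]) parts, ih t ([] ++ [c]) []]
        cases h : pvSufGo sep n t [] [] with
        | nil => simp
        | cons x xs => simp

theorem pv_cutGo_ne_nil (sep : List Char) :
    ∀ (fuel : Nat) (l cur : List Char) (parts : List (List Char)),
      pvSufGo sep fuel l cur parts ≠ [] := by
  intro fuel
  induction fuel with
  | zero => intro l cur parts; cases l <;> simp [pvSufGo]
  | succ n ih =>
    intro l cur parts
    cases l with
    | nil => simp [pvSufGo]
    | cons c t =>
      by_cases hp : sep.isPrefixOf (c :: t) = true <;> simp [pvSufGo, hp] <;> apply ih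

-- the scanner's result does not depend on the fuel, as long as fuel ≥ length
theorem pv_cutGo_fuel (sep : List Char) (hsep : sep ≠ []) :
    ∀ (n : Nat) (l : List Char), l.length ≤ n →
      ∀ (f1 f2 : Nat) (cur : List Char) (parts : List (List Char)),
        l.length ≤ f1 → l.length ≤ f2 →
        pvSufGo sep f1 l cur parts = pvSufGo sep f2 l cur parts := by
  intro n
  induction n with
  | zero =>
    intro l hl f1 f2 cur parts _ _
    have : l = [] := List.length_eq_zero_iff.1 (Nat.le_zero.1 hl)
    subst this
    cases f1 <;> cases f2 <;> simp [pvSufGo]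
  | succ n ih =>
    intro l hl f1 f2 cur parts h1 h2
    cases l with
    | nil => cases f1 <;> cases f2 <;> simp [pvSufGo]
    | cons c t =>
      match f1, f2, h1, h2 with
      | a + 1, b + 1, h1, h2 =>
        have hsl : 1 ≤ sep.length := by
          cases sep with
          | nil => exact absurd rfl hsep
          | cons x xs => simp
        by_cases hp : sep.isPrefixOf (c :: t) = true
        · have hd : ((c :: t).drop sep.length).length ≤ n := by
            simp only [List.length_drop, List.length_cons]
            simp only [List.length_cons] at hl
            omega
          have hda : ((c :: t).drop sep.length).length ≤ a := by
            simp only [List.length_drop, List.length_cons]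
            simp only [List.length_cons] at h1
            omega
          have hdb : ((c :: t).drop sep.length).length ≤ b := by
            simp only [List.length_drop, List.length_cons]
            simp only [List.length_cons] at h2
            omega
          simp only [pvSufGo, hp, if_pos]
          exact ih _ hd a b [] (parts ++ [cur]) hda hdb
        · have hd : t.length ≤ n := by
            simp only [List.length_cons] at hl; omega
          simp only [pvSufGo, hp, Bool.false_eq_true]
          exact ih t hd a b (cur ++ [c]) parts
            (by simp only [List.length_cons] at h1; omega)
            (by simp only [List.length_cons] at h2; omega)

-- ===== Horspool correctness =====

-- the shift table: every stored shift is in [1, m], and any occurrence of c at index j < m-1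
-- bounds the shift by m-1-j (the table keeps the LAST such j, i.e. the minimal shift)
theorem pv_table_aux (p : List Char) (hp : p ≠ []) :
    ∀ (k : Nat), k ≤ p.length - 1 → ∀ c,
      1 ≤ ((List.range k).foldl (fun t j => t.insert (p.getD j 'a') (p.length - 1 - j)) PySem.Dict.empty).getD c p.length
      ∧ ((List.range k).foldl (fun t j => t.insert (p.getD j 'a') (p.length - 1 - j)) PySem.Dict.empty).getD c p.length ≤ p.length
      ∧ ∀ j, j < k → p.getD j 'a' = c →
          ((List.range k).foldl (fun t j => t.insert (p.getD j 'a') (p.length - 1 - j)) PySem.Dict.empty).getD c p.length ≤ p.length - 1 - j := by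
  have hm : 1 ≤ p.length := by cases p with | nil => exact absurd rfl hp | cons a t => simp
  intro k
  induction k with
  | zero =>
    intro _ c
    refine ⟨?_, ?_, ?_⟩ <;> simp [PySem.Dict.getD_empty, hm]
  | succ k ih =>
    intro hk c
    obtain ⟨ih1, ih2, ih3⟩ := ih (by omega) c
    rw [List.range_succ, List.foldl_append, List.foldl_cons, List.foldl_nil]
    rw [PySem.Dict.getD_insert]
    by_cases hc : c = p.getD k 'a'
    · rw [if_pos hc]
      refine ⟨by omega, by omega, ?_⟩
      intro j hj hjc
      omega
    · rw [if_neg hc]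
      refine ⟨ih1, ih2, ?_⟩
      intro j hj hjc
      rcases Nat.lt_succ_iff_lt_or_eq.1 hj with h | h
      · exact ih3 j h hjc
      · subst h; exact absurd hjc.symm hc
theorem pv_table_spec (p : List Char) (hp : p ≠ []) (c : Char) :
    1 ≤ (pvTable p).getD c p.length ∧ (pvTable p).getD c p.length ≤ p.length ∧
      (∀ j, j + 2 ≤ p.length → p.getD j 'a' = c →
        (pvTable p).getD c p.length ≤ p.length - 1 - j) := by
  obtain ⟨h1, h2, h3⟩ := pv_table_aux p hp (p.length - 1) le_rfl c
  exact ⟨h1, h2, fun j hj hc => h3 j (by omega) hc⟩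

-- a prefix pins every pattern character to the text: p[idx] = s[l+idx]
theorem pv_prefix_char (s p : List Char) (l idx : Nat)
    (hpre : p.isPrefixOf (s.drop l) = true) (hidx : idx < p.length) :
    p.getD idx 'a' = s.getD (l + idx) 'a' := by
  have h := List.isPrefixOf_iff_prefix.1 hpre
  have htake := List.prefix_iff_eq_take.1 h
  rw [List.getD_eq_getElem?_getD, List.getD_eq_getElem?_getD]
  rw [htake]
  rw [List.getElem?_take_of_lt hidx, List.getElem?_drop]

theorem pv_prefix_len (s p : List Char) (hp : p ≠ []) (l : Nat)
    (hpre : p.isPrefixOf (s.drop l) = true) : l + p.length ≤ s.length := by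
  have h := (List.isPrefixOf_iff_prefix.1 hpre).length_le
  rw [List.length_drop] at h
  rcases Nat.le_total l s.length with h' | h'
  · omega
  · have hnil : s.drop l = [] := List.drop_eq_nil_of_le h'
    rw [hnil] at hpre
    have := List.prefix_iff_eq_take.1 (List.isPrefixOf_iff_prefix.1 hpre)
    simp at this
    exact absurd this hp

theorem pv_find_spec (s p : List Char) (hp : p ≠ []) :
    ∀ (f i : Nat), s.length + 1 - i ≤ f →
      (∀ j, pvFind s p (pvTable p) f i = some j →
        i ≤ j ∧ p.isPrefixOf (s.drop j) = true ∧
          ∀ l, i ≤ l → l < j → ¬ p.isPrefixOf (s.drop l) = true) ∧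
      (pvFind s p (pvTable p) f i = none →
        ∀ l, i ≤ l → ¬ p.isPrefixOf (s.drop l) = true) := by
  have hm : 1 ≤ p.length := by cases p with | nil => exact absurd rfl hp | cons a t => simp
  intro f
  induction f with
  | zero =>
    intro i hf
    refine ⟨fun j hj => by simp [pvFind] at hj, fun _ l hl => ?_⟩
    intro hpre
    have := pv_prefix_len s p hp l hpre
    omega
  | succ f ih =>
    intro i hf
    by_cases hin : i + p.length ≤ s.length
    · by_cases hmatch : (s.drop i).take p.length = p
      · constructor
        · intro j hj
          rw [show pvFind s p (pvTable p) (f+1) i = some i from by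
            simp [pvFind, hin, hmatch]] at hj
          obtain rfl : j = i := by injection hj with h; omega
          refine ⟨le_rfl, ?_, fun l h1 h2 _ => by omega⟩
          exact List.isPrefixOf_iff_prefix.2 (List.prefix_iff_eq_take.2 hmatch.symm)
        · intro hj
          rw [show pvFind s p (pvTable p) (f+1) i = some i from by
            simp [pvFind, hin, hmatch]] at hj
          exact absurd hj (by simp)
      · set c := s.getD (i + p.length - 1) 'a' with hc
        set sh := (pvTable p).getD c p.length with hsh
        obtain ⟨h1, h2, h3⟩ := pv_table_spec p hp c
        rw [← hsh] at h1 h2 h3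
        have hstep : pvFind s p (pvTable p) (f+1) i = pvFind s p (pvTable p) f (i + sh) := by
          simp [pvFind, hin, hmatch, hsh, hc, List.getD_eq_getElem?_getD]
        have hih := ih (i + sh) (by omega)
        -- no occurrence of p starts in [i, i+sh)
        have hgap : ∀ l, i ≤ l → l < i + sh → ¬ p.isPrefixOf (s.drop l) = true := by
          intro l hl1 hl2 hpre
          rcases Nat.eq_or_lt_of_le hl1 with rfl | hlt
          · exact hmatch (List.prefix_iff_eq_take.1 (List.isPrefixOf_iff_prefix.1 hpre)).symm
          · -- l = i + k with 1 ≤ k < sh: the window's last char occurs in p at index m-1-k,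
            -- so the table bounds sh by k — contradiction
            have hk1 : 1 ≤ l - i := by omega
            have hk2 : l - i < sh := by omega
            have hidx : p.length - 1 - (l - i) < p.length := by omega
            have hchar := pv_prefix_char s p l (p.length - 1 - (l - i)) hpre hidx
            have heq : l + (p.length - 1 - (l - i)) = i + p.length - 1 := by omega
            rw [heq, ← hc] at hchar
            have := h3 (p.length - 1 - (l - i)) (by omega) hchar
            omega
        rw [hstep]
        constructor
        · intro j hj
          obtain ⟨hj1, hj2, hj3⟩ := (hih.1) j hj
          exact ⟨by omega, hj2, fun l hl1 hl2 => by
            rcases Nat.lt_or_ge l (i + sh) with h | h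
            · exact hgap l hl1 h
            · exact hj3 l h hl2⟩
        · intro hj l hl
          rcases Nat.lt_or_ge l (i + sh) with h | h
          · exact hgap l hl h
          · exact (hih.2) hj l h
    · refine ⟨fun j hj => by simp [pvFind, hin] at hj, fun _ l hl hpre => ?_⟩
      have := pv_prefix_len s p hp l hpre
      omega

theorem pv_suf_no_occ (p : List Char) :
    ∀ (l : List Char) (fuel : Nat) (cur : List Char) (parts : List (List Char)),
      l.length ≤ fuel → (∀ d, ¬ p.isPrefixOf (l.drop d) = true) →
      pvSufGo p fuel l cur parts = parts ++ [cur ++ l] := by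
  intro l
  induction l with
  | nil => intro fuel cur parts _ _; cases fuel <;> simp [pvSufGo]
  | cons c t ih =>
    intro fuel cur parts hf hocc
    match fuel, hf with
    | f + 1, hf =>
      have h0 : ¬ p.isPrefixOf (c :: t) = true := by simpa using hocc 0
      rw [show pvSufGo p (f+1) (c :: t) cur parts = pvSufGo p f t (cur ++ [c]) parts from by
        simp [pvSufGo, h0]]
      rw [ih f (cur ++ [c]) parts (by simpa using Nat.lt_succ_iff.1 (by simpa using hf))
        (fun d => by simpa using hocc (d + 1))]
      simp

theorem pv_suf_first_occ (p : List Char) (hp : p ≠ []) :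
    ∀ (j : Nat) (l cur : List Char) (parts : List (List Char)) (fuel : Nat),
      l.length ≤ fuel →
      (∀ d, d < j → ¬ p.isPrefixOf (l.drop d) = true) →
      p.isPrefixOf (l.drop j) = true →
      pvSufGo p fuel l cur parts
        = pvSufGo p (l.drop (j + p.length)).length (l.drop (j + p.length)) []
            (parts ++ [cur ++ l.take j]) := by
  have hm : 1 ≤ p.length := by cases p with | nil => exact absurd rfl hp | cons a t => simp
  intro j
  induction j with
  | zero =>
    intro l cur parts fuel hf hocc hocc0
    simp only [List.drop_zero] at hocc0
    cases l with
    | nil =>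
      exact absurd (List.prefix_iff_eq_take.1 (List.isPrefixOf_iff_prefix.1 hocc0)).symm
        (by simpa using hp)
    | cons c t =>
      match fuel, hf with
      | f + 1, hf =>
        rw [show pvSufGo p (f+1) (c :: t) cur parts
              = pvSufGo p f ((c :: t).drop p.length) [] (parts ++ [cur]) from by
            simp [pvSufGo, hocc0]]
        simp only [Nat.zero_add, List.take_zero, List.append_nil]
        exact pv_cutGo_fuel p hp ((c :: t).drop p.length).length _ le_rfl f _ [] _
          (by simp only [List.length_drop, List.length_cons] at *; omega) le_rfl
  | succ j ih =>
    intro l cur parts fuel hf hocc hoccj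
    cases l with
    | nil =>
      rw [List.drop_nil] at hoccj
      exact absurd (List.prefix_iff_eq_take.1 (List.isPrefixOf_iff_prefix.1 hoccj)).symm
        (by simpa using hp)
    | cons c t =>
      match fuel, hf with
      | f + 1, hf =>
        have h0 : ¬ p.isPrefixOf (c :: t) = true := by simpa using hocc 0 (by omega)
        rw [show pvSufGo p (f+1) (c :: t) cur parts = pvSufGo p f t (cur ++ [c]) parts from by
          simp [pvSufGo, h0]]
        rw [ih t (cur ++ [c]) parts f (by simpa using Nat.lt_succ_iff.1 (by simpa using hf))
          (fun d hd => by simpa using hocc (d + 1) (by omega))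
          (by simpa using hoccj)]
        simp only [List.take_succ_cons]
        rw [show j + 1 + p.length = (j + p.length) + 1 from by omega]
        simp

theorem pv_piecesGo_suf (s p : List Char) (hp : p ≠ []) :
    ∀ (f i : Nat) (out : List (List Char)), s.length + 1 - i ≤ f → i ≤ s.length →
      pvPiecesGo s p (pvTable p) f i out
        = out ++ pvSufGo p (s.drop i).length (s.drop i) [] [] := by
  have hm : 1 ≤ p.length := by cases p with | nil => exact absurd rfl hp | cons a t => simp
  intro f
  induction f with
  | zero => intro i out hf hi; omega
  | succ f ih =>
    intro i out hf hi
    cases hfind : pvFind s p (pvTable p) (s.length + 1) i with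
    | none =>
      have hno := (pv_find_spec s p hp (s.length + 1) i (by omega)).2 hfind
      rw [show pvPiecesGo s p (pvTable p) (f+1) i out = out ++ [s.drop i] from by
        simp [pvPiecesGo, hfind]]
      rw [pv_suf_no_occ p (s.drop i) _ [] [] le_rfl
        (fun d => by rw [List.drop_drop]; exact hno (i + d) (by omega))]
      simp
    | some j =>
      obtain ⟨hij, hjpre, hjmin⟩ := (pv_find_spec s p hp (s.length + 1) i (by omega)).1 j hfind
      have hjlen : j + p.length ≤ s.length := pv_prefix_len s p hp j hjpre
      rw [show pvPiecesGo s p (pvTable p) (f+1) i out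
            = pvPiecesGo s p (pvTable p) f (j + p.length) (out ++ [(s.drop i).take (j - i)])
          from by simp [pvPiecesGo, hfind]]
      rw [ih (j + p.length) _ (by omega) (by omega)]
      rw [pv_suf_first_occ p hp (j - i) (s.drop i) [] [] _ le_rfl
        (fun d hd => by
          rw [List.drop_drop]
          exact hjmin (i + d) (by omega) (by omega))
        (by rw [List.drop_drop, show i + (j - i) = j from by omega]; exact hjpre)]
      rw [show (s.drop i).drop (j - i + p.length) = s.drop (j + p.length) from by
        rw [List.drop_drop]; congr 1; omega]
      rw [pv_cutGo_acc p _ _ [] _]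
      simp only [List.nil_append]
      rw [pv_cutGo_acc p (List.drop (j + p.length) s).length (List.drop (j + p.length) s) []
        [List.take (j - i) (List.drop i s)]]
      cases h : pvSufGo p (List.drop (j + p.length) s).length (List.drop (j + p.length) s) [] [] with
      | nil => exact absurd h (pv_cutGo_ne_nil p _ _ [] [])
      | cons x xs => simp

-- _pieces with a non-empty separator, as the suffix machine
theorem pv_pieces_suf (s p : List Char) (hp : p ≠ []) :
    pvPieces s p = pvSufGo p s.length s [] [] := by
  rw [pvPieces, if_neg (by simpa using hp)]
  rw [pv_piecesGo_suf s p hp (s.length + 1) 0 [] (by omega) (by omega)]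
  simp

-- ===== PySem replace / splitOn as the suffix machine (bridge to port A) =====

-- PySem's splitOn.go is the scanner (same fuel)
theorem pv_splitOn_go_cut (sep : List Char) (hsep : sep ≠ []) :
    ∀ (fuel : Nat) (l cur : List Char) (acc : List (List Char)), l.length ≤ fuel →
      PySem.Chars.splitOn.go sep fuel l cur acc
        = acc.reverse ++ List.modifyHead (cur.reverse ++ ·) (pvSufGo sep fuel l [] []) := by
  intro fuel
  induction fuel with
  | zero =>
    intro l cur acc hl
    have : l = [] := List.length_eq_zero_iff.1 (Nat.le_zero.1 hl)
    subst this
    simp [PySem.Chars.splitOn.go, pvSufGo]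
  | succ n ih =>
    intro l cur acc hl
    cases l with
    | nil => simp [PySem.Chars.splitOn.go, pvSufGo]
    | cons c t =>
      have hsl : 1 ≤ sep.length := by
        cases sep with
        | nil => exact absurd rfl hsep
        | cons x xs => simp
      by_cases hp : sep.isPrefixOf (c :: t) = true
      · have hd : ((c :: t).drop sep.length).length ≤ n := by
          simp only [List.length_drop, List.length_cons]
          simp only [List.length_cons] at hl
          omega
        rw [show PySem.Chars.splitOn.go sep (n+1) (c :: t) cur acc
              = PySem.Chars.splitOn.go sep n ((c :: t).drop sep.length) [] (cur.reverse :: acc)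
            from by simp [PySem.Chars.splitOn.go, hp]]
        rw [show pvSufGo sep (n+1) (c :: t) [] []
              = pvSufGo sep n ((c :: t).drop sep.length) [] [[]] from by simp [pvSufGo, hp]]
        rw [ih _ [] _ hd, pv_cutGo_acc sep n _ [] [[]]]
        cases h : pvSufGo sep n ((c :: t).drop sep.length) [] [] with
        | nil => simp
        | cons x xs => simp
      · have hd : t.length ≤ n := by simp only [List.length_cons] at hl; omega
        rw [show PySem.Chars.splitOn.go sep (n+1) (c :: t) cur acc
              = PySem.Chars.splitOn.go sep n t (c :: cur) acc
            from by simp [PySem.Chars.splitOn.go, hp]]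
        rw [show pvSufGo sep (n+1) (c :: t) [] []
              = pvSufGo sep n t ([] ++ [c]) [] from by simp [pvSufGo, hp]]
        rw [ih t (c :: cur) acc hd, pv_cutGo_acc sep n t ([] ++ [c]) []]
        cases h : pvSufGo sep n t [] [] with
        | nil => exact absurd h (pv_cutGo_ne_nil sep n t [] [])
        | cons x xs => simp

theorem pv_splitOn_cut (s sep : List Char) (hsep : sep ≠ []) :
    PySem.Chars.splitOn s sep = pvSufGo sep s.length s [] [] := by
  rw [PySem.Chars.splitOn, pv_splitOn_go_cut sep hsep (s.length + 1) s [] [] (by omega),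
    pv_cutGo_fuel sep hsep s.length s le_rfl (s.length + 1) s.length [] [] (by omega) le_rfl]
  cases h : pvSufGo sep s.length s [] [] with
  | nil => exact absurd h (pv_cutGo_ne_nil sep s.length s [] [])
  | cons x xs => simp

-- join over a scanner result: the two shapes the replace lemma needs
theorem pv_join_modifyHead (sep : List Char) (c : Char) (X : List (List Char)) (hX : X ≠ []) :
    PySem.Chars.join sep (List.modifyHead (c :: ·) X) = c :: PySem.Chars.join sep X := by
  cases X with
  | nil => exact absurd rfl hX
  | cons x xs =>
    cases xs with
    | nil => simp [PySem.Chars.join_singleton]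
    | cons y ys => simp [PySem.Chars.join_cons_cons]

-- PySem's replace is join-of-the-cut (same fuel)
theorem pv_replace_go_cut (old new : List Char) (hold : old ≠ []) :
    ∀ (fuel : Nat) (l acc : List Char), l.length ≤ fuel →
      PySem.Chars.replace.go old new fuel l acc
        = acc.reverse ++ PySem.Chars.join new (pvSufGo old fuel l [] []) := by
  intro fuel
  induction fuel with
  | zero =>
    intro l acc hl
    have : l = [] := List.length_eq_zero_iff.1 (Nat.le_zero.1 hl)
    subst this
    simp [PySem.Chars.replace.go, pvSufGo, PySem.Chars.join_singleton]
  | succ n ih =>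
    intro l acc hl
    cases l with
    | nil => simp [PySem.Chars.replace.go, pvSufGo, PySem.Chars.join_singleton]
    | cons c t =>
      have hsl : 1 ≤ old.length := by
        cases old with
        | nil => exact absurd rfl hold
        | cons x xs => simp
      by_cases hp : old.isPrefixOf (c :: t) = true
      · have hd : ((c :: t).drop old.length).length ≤ n := by
          simp only [List.length_drop, List.length_cons]
          simp only [List.length_cons] at hl
          omega
        rw [show PySem.Chars.replace.go old new (n+1) (c :: t) acc
              = PySem.Chars.replace.go old new n ((c :: t).drop old.length) (new.reverse ++ acc)
            from by simp [PySem.Chars.replace.go, hp]]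
        rw [show pvSufGo old (n+1) (c :: t) [] []
              = pvSufGo old n ((c :: t).drop old.length) [] [[]] from by simp [pvSufGo, hp]]
        rw [ih _ _ hd, pv_cutGo_acc old n _ [] [[]]]
        cases h : pvSufGo old n ((c :: t).drop old.length) [] [] with
        | nil => exact absurd h (pv_cutGo_ne_nil old n _ [] [])
        | cons x xs => simp [PySem.Chars.join_cons_cons]
      · have hd : t.length ≤ n := by simp only [List.length_cons] at hl; omega
        rw [show PySem.Chars.replace.go old new (n+1) (c :: t) acc
              = PySem.Chars.replace.go old new n t (c :: acc)
            from by simp [PySem.Chars.replace.go, hp]]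
        rw [show pvSufGo old (n+1) (c :: t) [] []
              = pvSufGo old n t ([] ++ [c]) [] from by simp [pvSufGo, hp]]
        rw [ih t (c :: acc) hd, pv_cutGo_acc old n t ([] ++ [c]) []]
        simp only [List.nil_append, List.singleton_append]
        rw [pv_join_modifyHead new c _ (pv_cutGo_ne_nil old n t [] [])]
        simp

theorem pv_replace_cut (s old new : List Char) (hold : old ≠ []) :
    PySem.Chars.replace s old new = PySem.Chars.join new (pvSufGo old s.length s [] []) := by
  rw [PySem.Chars.replace, if_neg (by simpa using hold)]
  simpa using pv_replace_go_cut old new hold s.length s [] le_rfl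

-- join over unit pieces: the empty-separator cut rebuilds str.replace('')
theorem pv_join_units (new : List Char) :
    ∀ s : List Char,
      PySem.Chars.join new (s.map (fun c => [c]) ++ [[]]) = s.flatMap (fun c => c :: new) := by
  intro s
  induction s with
  | nil => simp [PySem.Chars.join_singleton]
  | cons c t ih =>
    rw [List.map_cons, List.cons_append]
    cases hX : t.map (fun c => [c]) ++ [[]] with
    | nil => exact absurd hX (by simp)
    | cons x xs =>
      rw [PySem.Chars.join_cons_cons, ← hX, ih]
      simp

theorem pv_replace_empty (s new : List Char) :
    PySem.Chars.replace s [] new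
      = PySem.Chars.join new ([[]] ++ s.map (fun c => [c]) ++ [[]]) := by
  rw [PySem.Chars.replace, if_pos (by simp)]
  rw [List.append_assoc]
  have h2 := pv_join_units new s
  cases hX : s.map (fun c => [c]) ++ [[]] with
  | nil => exact absurd hX (by simp)
  | cons x xs =>
    have h3 : PySem.Chars.join new ([[]] ++ x :: xs) = [] ++ new ++ PySem.Chars.join new (x :: xs) :=
      PySem.Chars.join_cons_cons new [] x xs
    rw [h3, ← hX, h2]
    simp

-- one pass of the sign loop: join-with-first of the Horspool pieces IS A's replace
theorem pv_step (first l sg : String) :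
    PySem.Chars.join first.toList (pvPieces l.toList sg.toList)
      = (PySem.Str.replace l sg first).toList := by
  rw [show (PySem.Str.replace l sg first).toList
        = PySem.Chars.replace l.toList sg.toList first.toList from by
    rw [PySem.Str.replace, String.toList_ofList]]
  by_cases h : sg.toList = []
  · rw [pvPieces, if_pos (by simpa using h), h, pv_replace_empty]
  · rw [pv_pieces_suf _ _ h, pv_replace_cut _ _ _ h]

-- the sign loop: B's fold over Horspool cut-and-join tracks A's replace-fold
theorem pv_fold_steps (first : String) :
    ∀ (sgs : List String) (l : String),
      sgs.foldl (fun t sg => PySem.Chars.join first.toList (pvPieces t sg.toList)) l.toList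
        = (sgs.foldl (fun x i => PySem.Str.replace x i first) l).toList := by
  intro sgs
  induction sgs with
  | nil => intro l; rfl
  | cons sg sgs' ih =>
    intro l
    rw [List.foldl_cons, List.foldl_cons, pv_step]
    exact ih (PySem.Str.replace l sg first)

theorem pv_filter_pieces (pieces : List (List Char)) :
    ((pieces.map String.ofList).filter (fun x => decide (0 < x.length)))
      = (pieces.filter (fun x => !decide (x = []))).map String.ofList := by
  rw [List.filter_map]
  congr 1
  apply List.filter_congr
  intro x _
  rcases x with _ | ⟨y, ys⟩ <;> simp [Function.comp]

-- ===== VERDICT (by name: the statement is the Claim_ definition above) =====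
theorem ProcessRawLine_py_spec : Claim_equal_ProcessRawLine_py := by
  intro line SplitSigns _ hpre
  obtain ⟨hne, hh⟩ := hpre
  unfold Spec_ProcessRawLine_py
  match SplitSigns, hne with
  | s0 :: rest, _ =>
    have hs0s : s0 ≠ "" := by simpa using hh
    have hs0 : s0.toList ≠ [] := by
      intro hc
      exact hs0s (by rw [← String.ofList_toList (s := s0), hc])
    have h0 : PySem.List.pyGet? (s0 :: rest) (0 : Int) = some s0 := by
      simp [PySem.List.pyGet?, PySem.List.pyIdx?]
    have hslice : PySem.List.slice (s0 :: rest) (some 1) none = rest := by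
      rw [PySem.List.slice_from _ (by norm_num)]
      rfl
    -- the newline pass: A's replace is B's Horspool cut-and-rejoin
    have hline1 : PySem.Chars.join [] (pvPieces line.toList ['\n'])
        = (PySem.Str.replace line "\n" "").toList := by
      rw [show PySem.Str.replace line "\n" ""
            = String.ofList (PySem.Chars.replace line.toList ['\n'] []) from rfl]
      rw [String.toList_ofList, pv_replace_cut _ _ _ (by simp), pv_pieces_suf _ _ (by simp)]
    simp only [ProcessRawLine_py, ProcessRawLine_py_alt, h0, hslice,
      List.drop_succ_cons, List.drop_zero]
    rw [hline1, pv_fold_steps s0 rest (PySem.Str.replace line "\n" "")]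
    set T := rest.foldl (fun x i => PySem.Str.replace x i s0) (PySem.Str.replace line "\n" "")
      with hT
    rw [show PySem.Str.split? T s0 = some ((PySem.Chars.splitOn T.toList s0.toList).map
          String.ofList) from by
      rw [PySem.Str.split?, PySem.Chars.split?, if_neg (by simpa using hs0)]
      rfl]
    rw [pv_splitOn_cut _ _ hs0]
    rw [pv_pieces_suf _ _ hs0]
    simp [pv_filter_pieces]
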